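-- pv_equiv track=rewrite | github.com/danydoerr/GraphTeams | scripts/nearest_neighbor_go_scores.py | getAllRootPaths
-- ===== SOURCE A (Python) =====
-- def getAllRootPaths(goId, goData):
--     """ find all paths to the root for a given GO ID """
--     if not goId:
--         return list()
--     if goId not in goData:
--         return [[goId]]
--
--     res = list()
--     for i in goData[goId]:
--         paths = getAllRootPaths(i, goData)
--         for path in paths:
--             res.append([goId] + path)
--     return res
-- ===== SOURCE B (Python) =====
-- def getAllRootPaths(goId, goData):
--     """ find all paths to the root for a given GO ID """
--     memo = {}
--
--     def paths(node):
--         if not node: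
--             return []
--         if node not in goData:
--             return [[node]]
--         cached = memo.get(node)
--         if cached is None:
--             cached = [[node] + tail for parent in goData[node] for tail in paths(parent)]
--             memo[node] = cached
--         return cached
--
--     return paths(goId)
-- ===== Notes on version B (the rewrite author's own statement) =====
-- stated objective: alternative
-- what changed: B memoizes each node's list of root paths in a dict built during one DFS (list comprehension per node), so a shared ancestor's path set is computed once, instead of A's plain recursion that rebuilds it per incoming path with nested append loops.
import Mathlib
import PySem

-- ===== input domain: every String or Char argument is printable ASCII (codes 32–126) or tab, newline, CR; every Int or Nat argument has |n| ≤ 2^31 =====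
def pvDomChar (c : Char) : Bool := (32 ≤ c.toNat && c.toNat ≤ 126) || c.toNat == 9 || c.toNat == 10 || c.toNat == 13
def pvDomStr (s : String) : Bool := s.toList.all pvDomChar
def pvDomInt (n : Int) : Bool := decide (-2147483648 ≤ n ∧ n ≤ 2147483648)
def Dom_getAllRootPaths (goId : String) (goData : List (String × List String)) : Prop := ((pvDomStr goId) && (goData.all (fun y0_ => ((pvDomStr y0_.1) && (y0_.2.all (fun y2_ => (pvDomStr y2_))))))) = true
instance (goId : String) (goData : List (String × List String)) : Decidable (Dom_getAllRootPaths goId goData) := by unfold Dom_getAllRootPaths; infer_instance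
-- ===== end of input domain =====

-- B computes the same root-path lists by a memoized DFS (a per-node cache dict) instead of
-- A's plain recursion with nested append loops; same return value (objective: alternative).
-- Both Pythons recurse forever (RecursionError) on cyclic parent graphs; Pre_ excludes those.

-- ===== PORT A =====
-- fuel only makes the recursion total in Lean: goData.length + 1 bounds the recursion
-- depth on every input satisfying Pre_ (acyclic), so the fuel-0 branch is never reached there.
def getAllRootPathsFuel : Nat → String → List (String × List String) → List (List String)
  | 0, _, _ => []
  | f + 1, goId, goData =>
    if goId = "" then []                                     -- if not goId: return list()
    else
      match (PySem.Dict.mk goData).get? goId with            -- if goId not in goData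
      | none => [[goId]]
      | some parents =>                                      -- for i in goData[goId]
        parents.foldl (fun res i =>
          (getAllRootPathsFuel f i goData).foldl             -- for path in paths
            (fun res path => res ++ [goId :: path]) res) []  -- res.append([goId] + path)

def getAllRootPaths (goId : String) (goData : List (String × List String)) : List (List String) :=
  getAllRootPathsFuel (goData.length + 1) goId goData

-- ===== PORT B =====
-- inner closure `paths` of Source B, with the memo dict threaded through explicitly
def pathsFuel : Nat → String → List (String × List String) →
    PySem.Dict String (List (List String)) →
    List (List String) × PySem.Dict String (List (List String))
  | 0, _, _, memo => ([], memo)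
  | f + 1, node, goData, memo =>
    if node = "" then ([], memo)                             -- if not node: return []
    else
      match (PySem.Dict.mk goData).get? node with            -- if node not in goData
      | none => ([[node]], memo)
      | some parents =>
        match memo.get? node with                            -- cached = memo.get(node)
        | some cached => (cached, memo)
        | none =>                                            -- the list comprehension
          let r := parents.foldl
            (fun (acc : List (List String) × PySem.Dict String (List (List String))) parent =>
              let t := pathsFuel f parent goData acc.2
              (acc.1 ++ t.1.map (fun tail => node :: tail), t.2)) ([], memo)
          (r.1, r.2.insert node r.1)                         -- memo[node] = cached

def getAllRootPaths_alt (goId : String) (goData : List (String × List String)) : List (List String) :=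
  (pathsFuel (goData.length + 1) goId goData PySem.Dict.empty).1

-- ===== PRECONDITION & SPEC =====
-- parent edges actually followed by the recursion (the empty id is never expanded)
def pvSucc (goData : List (String × List String)) (a : String) : List String :=
  if a = "" then [] else ((PySem.Dict.mk goData).get? a).getD []

-- nodes reachable from a in 1..n parent steps
def pvReach (goData : List (String × List String)) : Nat → String → List String
  | 0, _ => []
  | n + 1, a => pvSucc goData a ++ (pvSucc goData a).flatMap (pvReach goData n)

-- Pre_: the parent graph is acyclic (no key reaches itself); on cyclic inputs the
-- Python A recurses without bound and raises RecursionError, so it returns nothing there.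
def Pre_getAllRootPaths (goId : String) (goData : List (String × List String)) : Prop :=
  ∀ p ∈ goData, p.1 ∉ pvReach goData (goData.length + 1) p.1

instance (goId : String) (goData : List (String × List String)) : Decidable (Pre_getAllRootPaths goId goData) := by
  unfold Pre_getAllRootPaths; infer_instance

def pvWitness_getAllRootPaths : String × (List (String × List String)) :=
  ("a", [("a", ["b", "c"]), ("b", ["c"])])

def Spec_getAllRootPaths (goId : String) (goData : List (String × List String)) (out : List (List String)) : Prop := out = getAllRootPaths_alt goId goData
instance (goId : String) (goData : List (String × List String)) (out : List (List String)) : Decidable (Spec_getAllRootPaths goId goData out) := by unfold Spec_getAllRootPaths; infer_instance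

-- ===== CLAIM (what is proved, stated in full; the proofs are below) =====
def Claim_equal_getAllRootPaths : Prop := ∀ (goId : String) (goData : List (String × List String)), Dom_getAllRootPaths goId goData → Pre_getAllRootPaths goId goData → Spec_getAllRootPaths goId goData (getAllRootPaths goId goData)

-- ===== LEMMAS AND PROOFS =====

lemma foldl_append_cons (g : String) :
    ∀ (xs res : List (List String)),
      xs.foldl (fun r p => r ++ [g :: p]) res = res ++ xs.map (g :: ·) := by
  intro xs
  induction xs with
  | nil => simp
  | cons x xs ih => intro res; simp [List.foldl_cons, ih]

lemma foldl_flatMap (goId : String) (g : String → List (List String)) :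
    ∀ (parents : List String) (init : List (List String)),
      parents.foldl (fun res i => (g i).foldl (fun res path => res ++ [goId :: path]) res) init =
        init ++ parents.flatMap (fun i => (g i).map (goId :: ·)) := by
  intro parents
  induction parents with
  | nil => simp
  | cons p ps ih =>
    intro init
    rw [List.foldl_cons, foldl_append_cons, ih]
    simp [List.flatMap_cons]

lemma getAllRootPathsFuel_succ (f : Nat) (goId : String) (goData : List (String × List String)) :
    getAllRootPathsFuel (f + 1) goId goData =
      if goId = "" then []
      else
        match (PySem.Dict.mk goData).get? goId with
        | none => [[goId]]
        | some parents =>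
          parents.flatMap (fun i => (getAllRootPathsFuel f i goData).map (goId :: ·)) := by
  by_cases h : goId = ""
  · simp [getAllRootPathsFuel, h]
  · simp only [getAllRootPathsFuel, if_neg h]
    cases hk : (PySem.Dict.mk goData).get? goId with
    | none => rfl
    | some parents =>
      simpa using foldl_flatMap goId (fun i => getAllRootPathsFuel f i goData) parents []

lemma pvReach_mono (goData : List (String × List String)) :
    ∀ (m n : Nat), m ≤ n → ∀ a x, x ∈ pvReach goData m a → x ∈ pvReach goData n a := by
  intro m
  induction m with
  | zero => intro n _ a x hx; simp [pvReach] at hx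
  | succ m ih =>
    intro n hmn a x hx
    obtain ⟨n, rfl⟩ : ∃ k, n = k + 1 := ⟨n - 1, by omega⟩
    simp only [pvReach, List.mem_append, List.mem_flatMap] at hx ⊢
    rcases hx with h | ⟨b, hb, hx⟩
    · exact Or.inl h
    · exact Or.inr ⟨b, hb, ih n (by omega) b x hx⟩

lemma pvReach_step (goData : List (String × List String)) {a b : String}
    (hb : b ∈ pvSucc goData a) :
    ∀ {n x}, x ∈ pvReach goData n b → x ∈ pvReach goData (n + 1) a := by
  intro n x hx
  simp only [pvReach, List.mem_append, List.mem_flatMap]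
  exact Or.inr ⟨b, hb, hx⟩

lemma pvSucc_mem_reach (goData : List (String × List String)) {a b : String}
    (hb : b ∈ pvSucc goData a) (n : Nat) : b ∈ pvReach goData (n + 1) a := by
  simp only [pvReach, List.mem_append]
  exact Or.inl hb

lemma nodup_subset_length {V W : List String} (hnd : V.Nodup) (hsub : V ⊆ W) :
    V.length ≤ W.length :=
  (hnd.subperm hsub).length_le

lemma mem_keys_of_get?_some {goData : List (String × List String)} {node : String}
    {parents : List String} (hk : (PySem.Dict.mk goData).get? node = some parents) :
    node ∈ goData.map Prod.fst := by
  by_contra hmem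
  have h0 : (PySem.Dict.mk goData).get? node = none :=
    (PySem.Dict.get?_eq_none_iff_not_mem_keys _ _).mpr (by simpa [PySem.Dict.keys] using hmem)
  rw [hk] at h0
  simp at h0

lemma self_not_reach {goData : List (String × List String)}
    (hpre : Pre_getAllRootPaths "" goData) {node : String}
    (hmem : node ∈ goData.map Prod.fst) :
    node ∉ pvReach goData (goData.length + 1) node := by
  obtain ⟨p, hp, rfl⟩ := List.mem_map.mp hmem
  exact hpre p hp

-- conditions handed to the recursive calls on the parents of `node`
lemma child_conds {goData : List (String × List String)}
    (hpre : Pre_getAllRootPaths "" goData) {V : List String} {node : String}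
    {parents : List String}
    (hne : node ≠ "") (hk : (PySem.Dict.mk goData).get? node = some parents)
    (hlen : V.length ≤ goData.length)
    (hreach : ∀ m ∈ pvReach goData (goData.length + 1 - V.length) node, m ∉ V) :
    ∀ i ∈ parents, i ∉ node :: V ∧
      (∀ m ∈ pvReach goData (goData.length + 1 - (V.length + 1)) i, m ∉ node :: V) := by
  have hself : node ∉ pvReach goData (goData.length + 1) node :=
    self_not_reach hpre (mem_keys_of_get?_some hk)
  have hsucc : parents = pvSucc goData node := by simp [pvSucc, hne, hk]
  intro i hi
  have hi' : i ∈ pvSucc goData node := hsucc ▸ hi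
  have hstep : ∀ m n, m ∈ pvReach goData n i → m ∈ pvReach goData (n + 1) node :=
    fun m n hm => pvReach_step goData hi' hm
  constructor
  · intro hmem
    rcases List.mem_cons.mp hmem with heq | hmemV
    · -- i = node: node would reach itself in one step
      rw [heq] at hi'
      exact hself (pvReach_mono goData 1 (goData.length + 1) (by omega) node node
        (pvSucc_mem_reach goData hi' 0))
    · -- i ∈ V: i is reachable from node, contradicting hreach
      have h1 : i ∈ pvReach goData (goData.length + 1 - V.length) node := by
        have : i ∈ pvReach goData ((goData.length - V.length) + 1) node :=
          pvSucc_mem_reach goData hi' _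
        exact pvReach_mono goData _ _ (by omega) _ _ this
      exact hreach i h1 hmemV
  · intro m hm hmem
    have hm' : m ∈ pvReach goData (goData.length + 1 - V.length) node := by
      have : m ∈ pvReach goData ((goData.length + 1 - (V.length + 1)) + 1) node :=
        hstep m _ hm
      exact pvReach_mono goData _ _ (by omega) _ _ this
    rcases List.mem_cons.mp hmem with heq | hmemV
    · subst heq
      exact hself (pvReach_mono goData _ _ (by omega) _ _ hm')
    · exact hreach m hm' hmemV

-- A's result does not depend on the fuel, as long as the fuel is sufficient
lemma Astab {goData : List (String × List String)}
    (hpre : Pre_getAllRootPaths "" goData) :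
    ∀ (f₁ f₂ : Nat) (V : List String) (node : String),
      V.Nodup → (∀ v ∈ V, v ∈ goData.map Prod.fst) →
      goData.length + 1 - V.length ≤ f₁ → goData.length + 1 - V.length ≤ f₂ →
      node ∉ V →
      (∀ m ∈ pvReach goData (goData.length + 1 - V.length) node, m ∉ V) →
      getAllRootPathsFuel f₁ node goData = getAllRootPathsFuel f₂ node goData := by
  intro f₁
  induction f₁ with
  | zero =>
    intro f₂ V node hnd hsub h1 h2 hnV hreach
    have : V.length ≤ goData.length := by
      have := nodup_subset_length hnd hsub; simpa using this
    omega
  | succ f₁ ih =>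
    intro f₂ V node hnd hsub h1 h2 hnV hreach
    have hlen : V.length ≤ goData.length := by
      have := nodup_subset_length hnd hsub; simpa using this
    obtain ⟨f₂, rfl⟩ : ∃ k, f₂ = k + 1 := ⟨f₂ - 1, by omega⟩
    rw [getAllRootPathsFuel_succ, getAllRootPathsFuel_succ]
    by_cases hne : node = ""
    · simp [hne]
    · simp only [if_neg hne]
      cases hk : (PySem.Dict.mk goData).get? node with
      | none => rfl
      | some parents =>
        simp only []
        have hcc := child_conds hpre hne hk hlen hreach
        have hlen' : (node :: V).length ≤ goData.length := by
          have := nodup_subset_length (List.nodup_cons.mpr ⟨hnV, hnd⟩)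
            (fun v hv => by
              rcases List.mem_cons.mp hv with rfl | hv
              · exact mem_keys_of_get?_some hk
              · exact hsub v hv)
          simpa using this
        rw [List.flatMap_def, List.flatMap_def]
        congr 1
        apply List.map_congr_left
        intro i hi
        have ⟨hiV, hir⟩ := hcc i hi
        rw [ih f₂ (node :: V) i (List.nodup_cons.mpr ⟨hnV, hnd⟩)
          (fun v hv => by
            rcases List.mem_cons.mp hv with rfl | hv
            · exact mem_keys_of_get?_some hk
            · exact hsub v hv)
          (by simp only [List.length_cons] at hlen' ⊢; omega) (by simp only [List.length_cons] at hlen' ⊢; omega) hiV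
          (by simpa using hir)]

-- the memo always stores exactly A's (full-fuel) answer
def MemoInv (goData : List (String × List String))
    (memo : PySem.Dict String (List (List String))) : Prop :=
  ∀ k v, memo.get? k = some v → v = getAllRootPathsFuel (goData.length + 1) k goData

lemma Bcorrect {goData : List (String × List String)}
    (hpre : Pre_getAllRootPaths "" goData) :
    ∀ (f : Nat) (V : List String) (node : String)
      (memo : PySem.Dict String (List (List String))),
      V.Nodup → (∀ v ∈ V, v ∈ goData.map Prod.fst) →
      goData.length + 1 - V.length ≤ f →
      node ∉ V →
      (∀ m ∈ pvReach goData (goData.length + 1 - V.length) node, m ∉ V) →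
      MemoInv goData memo →
      (pathsFuel f node goData memo).1 = getAllRootPathsFuel (goData.length + 1) node goData ∧
        MemoInv goData (pathsFuel f node goData memo).2 := by
  intro f
  induction f with
  | zero =>
    intro V node memo hnd hsub h1 hnV hreach hInv
    have : V.length ≤ goData.length := by
      have := nodup_subset_length hnd hsub; simpa using this
    omega
  | succ f ih =>
    intro V node memo hnd hsub h1 hnV hreach hInv
    have hlen : V.length ≤ goData.length := by
      have := nodup_subset_length hnd hsub; simpa using this
    by_cases hne : node = ""
    · have hval : pathsFuel (f + 1) node goData memo = ([], memo) := by
        simp [pathsFuel, hne]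
      rw [hval]
      refine ⟨?_, hInv⟩
      rw [getAllRootPathsFuel_succ]
      simp [hne]
    · rcases hk : (PySem.Dict.mk goData).get? node with _ | parents
      · have hval : pathsFuel (f + 1) node goData memo = ([[node]], memo) := by
          simp [pathsFuel, hne, hk]
        rw [hval]
        refine ⟨?_, hInv⟩
        rw [getAllRootPathsFuel_succ]
        simp [hne, hk]
      · have hcc := child_conds hpre hne hk hlen hreach
        have hnd' : (node :: V).Nodup := List.nodup_cons.mpr ⟨hnV, hnd⟩
        have hsub' : ∀ v ∈ node :: V, v ∈ goData.map Prod.fst := fun v hv => by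
          rcases List.mem_cons.mp hv with heq | hv
          · subst heq; exact mem_keys_of_get?_some hk
          · exact hsub v hv
        have hlen' : (node :: V).length ≤ goData.length := by
          have := nodup_subset_length hnd' hsub'; simpa using this
        -- A's answer at node, expressed through its parents at full fuel
        have hA : getAllRootPathsFuel (goData.length + 1) node goData =
            parents.flatMap
              (fun i => (getAllRootPathsFuel (goData.length + 1) i goData).map (node :: ·)) := by
          rw [getAllRootPathsFuel_succ]
          simp only [if_neg hne, hk]
          rw [List.flatMap_def, List.flatMap_def]
          congr 1
          apply List.map_congr_left
          intro i hi
          have hii := hcc i hi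
          rw [Astab hpre goData.length (goData.length + 1) (node :: V) i hnd' hsub'
            (by simp only [List.length_cons] at hlen' ⊢; omega) (by simp only [List.length_cons] at hlen' ⊢; omega) hii.1
            (by simpa using hii.2)]
        rcases hm : memo.get? node with _ | cached
        · -- not memoized: run the fold, then insert the result
          have key : ∀ (ps : List String), (∀ i ∈ ps, i ∈ parents) →
              ∀ (acc : List (List String)) (m₀ : PySem.Dict String (List (List String))),
              MemoInv goData m₀ →
              (ps.foldl
                (fun (acc : List (List String) × PySem.Dict String (List (List String))) parent =>
                  (acc.1 ++ (pathsFuel f parent goData acc.2).1.map (fun tail => node :: tail),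
                    (pathsFuel f parent goData acc.2).2)) (acc, m₀)).1 =
                acc ++ ps.flatMap
                  (fun i => (getAllRootPathsFuel (goData.length + 1) i goData).map (node :: ·)) ∧
              MemoInv goData (ps.foldl
                (fun (acc : List (List String) × PySem.Dict String (List (List String))) parent =>
                  (acc.1 ++ (pathsFuel f parent goData acc.2).1.map (fun tail => node :: tail),
                    (pathsFuel f parent goData acc.2).2)) (acc, m₀)).2 := by
            intro ps
            induction ps with
            | nil => intro _ acc m₀ hInv₀; simpa using hInv₀
            | cons i ps ihp =>
              intro hps acc m₀ hInv₀
              have hii := hcc i (hps i (List.mem_cons_self ..))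
              have hrec := ih (node :: V) i m₀ hnd' hsub'
                (by simp only [List.length_cons] at hlen' ⊢; omega) hii.1 (by simpa using hii.2) hInv₀
              have hnext := ihp (fun j hj => hps j (List.mem_cons_of_mem _ hj))
                (acc ++ (pathsFuel f i goData m₀).1.map (fun tail => node :: tail))
                (pathsFuel f i goData m₀).2 hrec.2
              refine ⟨?_, by simpa using hnext.2⟩
              rw [List.foldl_cons]
              rw [hnext.1, hrec.1, List.flatMap_cons, List.append_assoc]
          have hfold := key parents (fun _ h => h) [] memo hInv
          have hval : pathsFuel (f + 1) node goData memo =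
              ((parents.foldl
                (fun (acc : List (List String) × PySem.Dict String (List (List String))) parent =>
                  (acc.1 ++ (pathsFuel f parent goData acc.2).1.map (fun tail => node :: tail),
                    (pathsFuel f parent goData acc.2).2)) ([], memo)).1,
               (parents.foldl
                (fun (acc : List (List String) × PySem.Dict String (List (List String))) parent =>
                  (acc.1 ++ (pathsFuel f parent goData acc.2).1.map (fun tail => node :: tail),
                    (pathsFuel f parent goData acc.2).2)) ([], memo)).2.insert node
               (parents.foldl
                (fun (acc : List (List String) × PySem.Dict String (List (List String))) parent =>
                  (acc.1 ++ (pathsFuel f parent goData acc.2).1.map (fun tail => node :: tail),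
                    (pathsFuel f parent goData acc.2).2)) ([], memo)).1) := by
            simp only [pathsFuel, if_neg hne, hk, hm]
          rw [hval]
          have hres1 := hfold.1
          simp only [List.nil_append] at hres1
          refine ⟨by rw [hres1, hA], ?_⟩
          intro k v hkv
          rw [PySem.Dict.get?_insert] at hkv
          split_ifs at hkv with hkeq
          · subst hkeq
            cases hkv
            rw [hres1, hA]
          · exact hfold.2 k v hkv
        · -- memoized: return the cached value unchanged
          have hval : pathsFuel (f + 1) node goData memo = (cached, memo) := by
            simp only [pathsFuel, if_neg hne, hk, hm]
          rw [hval]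
          exact ⟨hInv node cached hm, hInv⟩

-- ===== VERDICT (by name: the statement is the Claim_ definition above) =====
theorem getAllRootPaths_spec : Claim_equal_getAllRootPaths := by
  intro goId goData _ hpre
  show getAllRootPaths goId goData = getAllRootPaths_alt goId goData
  have hpre' : Pre_getAllRootPaths "" goData := hpre
  have hInv : MemoInv goData PySem.Dict.empty := by
    intro k v hkv
    rw [PySem.Dict.get?_empty] at hkv
    simp at hkv
  have := Bcorrect hpre' (goData.length + 1) [] goId PySem.Dict.empty
    List.nodup_nil (by simp) (by simp) (by simp) (by simp) hInv
  exact this.1.symm
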